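-- pv_equiv track=rewrite | github.com/databricks-industry-solutions/many-model-forecasting | apps/app.py | detect_column_roles
-- ===== SOURCE A (Python) =====
-- _DEFAULT_ROLES = {
--     "model": "model",
--     "run_id": "run_id",
--     "run_date": "run_date",
--     "metric_name": "metric_name",
--     "metric_value": "metric_value",
--     "bt_start": "backtest_window_start_date",
--     "forecast": "forecast",
--     "actual": "actual",
-- }
--
-- def detect_column_roles(cols: list[tuple], group_col: str) -> dict:
--     """Detect standard column roles from a table schema.
--
--     Tries well-known names first, then falls back to type-based heuristics.
--     """
--     col_set = {c[0] for c in cols}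
--     mapping: dict[str, str] = {}
--
--     for role, default_name in _DEFAULT_ROLES.items():
--         if default_name in col_set:
--             mapping[role] = default_name
--
--     used = set(mapping.values()) | {group_col}
--     for name, dtype in cols:
--         if name in used:
--             continue
--         upper = dtype.upper()
--         is_array_num = "ARRAY" in upper and any(
--             t in upper for t in ("DOUBLE", "FLOAT", "INT", "DECIMAL")
--         )
--         if "forecast" not in mapping and is_array_num:
--             mapping["forecast"] = name
--             used.add(name)
--         elif "actual" not in mapping and is_array_num:
--             mapping["actual"] = name
--             used.add(name)
--
--     return mapping
-- ===== SOURCE B (Python) =====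
-- _DEFAULT_ROLES = {
--     "model": "model",
--     "run_id": "run_id",
--     "run_date": "run_date",
--     "metric_name": "metric_name",
--     "metric_value": "metric_value",
--     "bt_start": "backtest_window_start_date",
--     "forecast": "forecast",
--     "actual": "actual",
-- }
--
--
-- def _is_array_numeric(dtype: str) -> bool:
--     upper = dtype.upper()
--     return "ARRAY" in upper and any(
--         t in upper for t in ("DOUBLE", "FLOAT", "INT", "DECIMAL")
--     )
--
--
-- def detect_column_roles(cols: list[tuple], group_col: str) -> dict:
--     """Detect standard column roles from a table schema."""
--     col_set = {c[0] for c in cols}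
--     mapping: dict[str, str] = {}
--
--     for role, default_name in _DEFAULT_ROLES.items():
--         if default_name in col_set:
--             mapping[role] = default_name
--
--     used = set(mapping.values()) | {group_col}
--     for role in ("forecast", "actual"):
--         if role in mapping:
--             continue
--         for name, dtype in cols:
--             if name not in used and _is_array_numeric(dtype):
--                 mapping[role] = name
--                 used.add(name)
--                 break
--     return mapping
-- ===== Notes on version B (the rewrite author's own statement) =====
-- stated objective: simpler
-- what changed: Replaced the single stateful if/elif pass that interleaves the forecast/actual assignments with an outer loop over the two roles, each doing a plain first-match scan of the columns (with the array-numeric test factored into a helper).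
import Mathlib
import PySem

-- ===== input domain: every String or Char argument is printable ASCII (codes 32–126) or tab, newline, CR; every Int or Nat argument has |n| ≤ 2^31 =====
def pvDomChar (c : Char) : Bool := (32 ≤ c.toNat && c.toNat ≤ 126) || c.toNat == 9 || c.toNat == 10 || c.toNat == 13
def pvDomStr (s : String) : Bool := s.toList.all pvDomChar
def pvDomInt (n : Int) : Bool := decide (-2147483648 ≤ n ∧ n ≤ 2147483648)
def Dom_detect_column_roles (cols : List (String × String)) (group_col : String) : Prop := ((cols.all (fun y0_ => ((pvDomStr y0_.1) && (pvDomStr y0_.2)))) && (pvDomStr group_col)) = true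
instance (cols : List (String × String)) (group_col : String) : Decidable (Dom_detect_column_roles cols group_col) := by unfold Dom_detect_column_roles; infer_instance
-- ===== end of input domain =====

-- B replaces A's single stateful if/elif pass over the columns by an outer loop over the two
-- fallback roles, each doing a plain first-match scan (objective: simpler decomposition).

-- ===== PORT A =====
-- _DEFAULT_ROLES (module constant; dict in insertion order)
def pvDefaultRoles : List (String × String) :=
  [("model", "model"), ("run_id", "run_id"), ("run_date", "run_date"),
   ("metric_name", "metric_name"), ("metric_value", "metric_value"),
   ("bt_start", "backtest_window_start_date"), ("forecast", "forecast"), ("actual", "actual")]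

-- body of A's phase-2 loop 'for name, dtype in cols: …' (state = (mapping, used))
def pvStepA (st : PySem.Dict String String × PySem.Set String) (c : String × String) :
    PySem.Dict String String × PySem.Set String :=
  if PySem.Set.contains st.2 c.1 then st
  else
    let upper := PySem.Str.upper c.2
    let isArr := PySem.Str.isIn "ARRAY" upper &&
      (PySem.Str.isIn "DOUBLE" upper || PySem.Str.isIn "FLOAT" upper ||
       PySem.Str.isIn "INT" upper || PySem.Str.isIn "DECIMAL" upper)
    if !(st.1.contains "forecast") && isArr then
      (st.1.insert "forecast" c.1, PySem.Set.add st.2 c.1)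
    else if !(st.1.contains "actual") && isArr then
      (st.1.insert "actual" c.1, PySem.Set.add st.2 c.1)
    else st

def detect_column_roles (cols : List (String × String)) (group_col : String) :
    List (String × String) :=
  let colSet := PySem.Set.ofList (cols.map (·.1))
  let mapping := pvDefaultRoles.foldl
    (fun m rd => if PySem.Set.contains colSet rd.2 then m.insert rd.1 rd.2 else m)
    PySem.Dict.empty
  let used := PySem.Set.union (PySem.Set.ofList mapping.values) [group_col]
  (cols.foldl pvStepA (mapping, used)).1.items

-- ===== PORT B =====
-- helper _is_array_numeric
def pvIsArrayNum (dtype : String) : Bool :=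
  let upper := PySem.Str.upper dtype
  PySem.Str.isIn "ARRAY" upper &&
    (PySem.Str.isIn "DOUBLE" upper || PySem.Str.isIn "FLOAT" upper ||
     PySem.Str.isIn "INT" upper || PySem.Str.isIn "DECIMAL" upper)

-- B's inner scan: first column whose name is unused and whose dtype is array-numeric
def pvFindEligible : List (String × String) → PySem.Set String → Option String
  | [], _ => none
  | c :: rest, u =>
      if !(PySem.Set.contains u c.1) && pvIsArrayNum c.2 then some c.1
      else pvFindEligible rest u

-- body of B's outer loop 'for role in ("forecast", "actual"): …'
def pvStepB (cols : List (String × String))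
    (st : PySem.Dict String String × PySem.Set String) (role : String) :
    PySem.Dict String String × PySem.Set String :=
  if st.1.contains role then st
  else
    match pvFindEligible cols st.2 with
    | some n => (st.1.insert role n, PySem.Set.add st.2 n)
    | none => st

def detect_column_roles_alt (cols : List (String × String)) (group_col : String) :
    List (String × String) :=
  let colSet := PySem.Set.ofList (cols.map (·.1))
  let mapping := pvDefaultRoles.foldl
    (fun m rd => if PySem.Set.contains colSet rd.2 then m.insert rd.1 rd.2 else m)
    PySem.Dict.empty
  let used := PySem.Set.union (PySem.Set.ofList mapping.values) [group_col]
  (["forecast", "actual"].foldl (pvStepB cols) (mapping, used)).1.items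

-- ===== PRECONDITION & SPEC =====
def Spec_detect_column_roles (cols : List (String × String)) (group_col : String) (out : List (String × String)) : Prop := out = detect_column_roles_alt cols group_col
instance (cols : List (String × String)) (group_col : String) (out : List (String × String)) : Decidable (Spec_detect_column_roles cols group_col out) := by unfold Spec_detect_column_roles; infer_instance

-- ===== CLAIM (what is proved, stated in full; the proofs are below) =====
def Claim_equal_detect_column_roles : Prop := ∀ (cols : List (String × String)) (group_col : String), Dom_detect_column_roles cols group_col → Spec_detect_column_roles cols group_col (detect_column_roles cols group_col)

-- ===== LEMMAS AND PROOFS =====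

-- pvStepA with its local `let`s zeta-reduced and the dtype test named (definitional)
lemma pvStepA_eq (st : PySem.Dict String String × PySem.Set String) (c : String × String) :
    pvStepA st c =
      if PySem.Set.contains st.2 c.1 then st
      else if !(st.1.contains "forecast") && pvIsArrayNum c.2 then
        (st.1.insert "forecast" c.1, PySem.Set.add st.2 c.1)
      else if !(st.1.contains "actual") && pvIsArrayNum c.2 then
        (st.1.insert "actual" c.1, PySem.Set.add st.2 c.1)
      else st := rfl

lemma pv_stepA_used (st : PySem.Dict String String × PySem.Set String) (c : String × String)
    (hu : PySem.Set.contains st.2 c.1 = true) : pvStepA st c = st := by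
  rw [pvStepA_eq]; simp only [hu, if_pos]

lemma pv_stepA_notarr (st : PySem.Dict String String × PySem.Set String) (c : String × String)
    (harr : pvIsArrayNum c.2 = false) : pvStepA st c = st := by
  rw [pvStepA_eq]; simp only [harr, Bool.and_false, Bool.false_eq_true, if_false, ite_self]

lemma pv_stepA_forecast (st : PySem.Dict String String × PySem.Set String) (c : String × String)
    (hu : PySem.Set.contains st.2 c.1 = false) (hf : st.1.contains "forecast" = false)
    (harr : pvIsArrayNum c.2 = true) :
    pvStepA st c = (st.1.insert "forecast" c.1, PySem.Set.add st.2 c.1) := by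
  rw [pvStepA_eq]
  simp only [hu, hf, harr, Bool.not_false, Bool.true_and, Bool.false_eq_true, if_false, if_pos]

lemma pv_stepA_actual (st : PySem.Dict String String × PySem.Set String) (c : String × String)
    (hu : PySem.Set.contains st.2 c.1 = false) (hf : st.1.contains "forecast" = true)
    (ha : st.1.contains "actual" = false) (harr : pvIsArrayNum c.2 = true) :
    pvStepA st c = (st.1.insert "actual" c.1, PySem.Set.add st.2 c.1) := by
  rw [pvStepA_eq]
  simp only [hu, hf, ha, harr, Bool.not_true, Bool.not_false, Bool.false_and, Bool.true_and,
    Bool.false_eq_true, if_false, if_pos]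

-- pvStepB reductions
lemma pv_stepB_skip (cols : List (String × String))
    (st : PySem.Dict String String × PySem.Set String) (role : String)
    (h : st.1.contains role = true) : pvStepB cols st role = st := by
  simp only [pvStepB, h, if_pos]

lemma pv_stepB_go (cols : List (String × String))
    (st : PySem.Dict String String × PySem.Set String) (role : String)
    (h : st.1.contains role = false) :
    pvStepB cols st role =
      match pvFindEligible cols st.2 with
      | some n => (st.1.insert role n, PySem.Set.add st.2 n)
      | none => st := by
  simp only [pvStepB, h, Bool.false_eq_true, if_false]

lemma pv_stepB_nil (st : PySem.Dict String String × PySem.Set String) (role : String) :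
    pvStepB [] st role = st := by
  cases h : st.1.contains role
  · rw [pv_stepB_go [] st role h]
    rfl
  · rw [pv_stepB_skip [] st role h]

-- membership in a PySem.Set survives adding an element
lemma pv_contains_add (u : PySem.Set String) (n x : String) (h : PySem.Set.contains u n = true) :
    PySem.Set.contains (PySem.Set.add u x) n = true := by
  rw [PySem.Set.contains_iff] at h ⊢
  exact (PySem.Set.mem_add u x n).mpr (Or.inl h)

lemma pv_contains_add_self (u : PySem.Set String) (n : String) :
    PySem.Set.contains (PySem.Set.add u n) n = true := by
  rw [PySem.Set.contains_iff]
  exact (PySem.Set.mem_add u n n).mpr (Or.inr rfl)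

-- once both roles are assigned, A's phase-2 loop changes nothing
lemma pv_skipAll (cols : List (String × String)) (m : PySem.Dict String String)
    (u : PySem.Set String) (hf : m.contains "forecast" = true)
    (ha : m.contains "actual" = true) :
    cols.foldl pvStepA (m, u) = (m, u) := by
  induction cols with
  | nil => rfl
  | cons c rest ih =>
      have hstep : pvStepA (m, u) c = (m, u) := by
        rw [pvStepA_eq]
        simp only [hf, ha, Bool.not_true, Bool.false_and, Bool.false_eq_true, if_false, ite_self]
      rw [List.foldl_cons, hstep, ih]

-- head-column scan steps
lemma pv_find_cons_skip (c : String × String) (rest : List (String × String))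
    (u : PySem.Set String) (h : (!(PySem.Set.contains u c.1) && pvIsArrayNum c.2) = false) :
    pvFindEligible (c :: rest) u = pvFindEligible rest u := by
  simp only [pvFindEligible, h, Bool.false_eq_true, if_false]

lemma pv_find_cons_hit (c : String × String) (rest : List (String × String))
    (u : PySem.Set String) (hu : PySem.Set.contains u c.1 = false)
    (harr : pvIsArrayNum c.2 = true) : pvFindEligible (c :: rest) u = some c.1 := by
  simp only [pvFindEligible, hu, harr, Bool.not_false, Bool.true_and, if_pos]

-- the "cannot be selected" condition is preserved by growing `used`
lemma pv_cond_false_add (c : String × String) (u : PySem.Set String) (x : String)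
    (h : (!(PySem.Set.contains u c.1) && pvIsArrayNum c.2) = false) :
    (!(PySem.Set.contains (PySem.Set.add u x) c.1) && pvIsArrayNum c.2) = false := by
  cases hc : PySem.Set.contains u c.1
  · have harr : pvIsArrayNum c.2 = false := by
      rw [hc] at h; simpa using h
    simp only [harr, Bool.and_false]
  · simp only [pv_contains_add u c.1 x hc, Bool.not_true, Bool.false_and]

-- B's two-role pass ignores a head column that cannot be selected from the initial `used`
lemma pv_rolesB_cons_skip (c : String × String) (rest : List (String × String))
    (m : PySem.Dict String String) (u : PySem.Set String)
    (h : (!(PySem.Set.contains u c.1) && pvIsArrayNum c.2) = false) :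
    ["forecast", "actual"].foldl (pvStepB (c :: rest)) (m, u) =
      ["forecast", "actual"].foldl (pvStepB rest) (m, u) := by
  simp only [List.foldl_cons, List.foldl_nil]
  cases hf : m.contains "forecast"
  · rw [pv_stepB_go (c :: rest) (m, u) "forecast" hf, pv_stepB_go rest (m, u) "forecast" hf,
      pv_find_cons_skip c rest u h]
    cases hfind : pvFindEligible rest u with
    | none =>
        simp only
        cases ha : m.contains "actual"
        · rw [pv_stepB_go (c :: rest) (m, u) "actual" ha, pv_stepB_go rest (m, u) "actual" ha,
            pv_find_cons_skip c rest u h]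
        · rw [pv_stepB_skip (c :: rest) (m, u) "actual" ha,
            pv_stepB_skip rest (m, u) "actual" ha]
    | some n =>
        simp only
        cases ha : (m.insert "forecast" n).contains "actual"
        · rw [pv_stepB_go (c :: rest) _ "actual" ha, pv_stepB_go rest _ "actual" ha,
            pv_find_cons_skip c rest (PySem.Set.add u n) (pv_cond_false_add c u n h)]
        · rw [pv_stepB_skip (c :: rest) _ "actual" ha, pv_stepB_skip rest _ "actual" ha]
  · rw [pv_stepB_skip (c :: rest) (m, u) "forecast" hf, pv_stepB_skip rest (m, u) "forecast" hf]
    cases ha : m.contains "actual"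
    · rw [pv_stepB_go (c :: rest) (m, u) "actual" ha, pv_stepB_go rest (m, u) "actual" ha,
        pv_find_cons_skip c rest u h]
    · rw [pv_stepB_skip (c :: rest) (m, u) "actual" ha, pv_stepB_skip rest (m, u) "actual" ha]

-- MAIN: A's interleaved pass equals B's per-role scans, from any starting state
lemma pv_phase2_eq (cols : List (String × String)) :
    ∀ (m : PySem.Dict String String) (u : PySem.Set String),
      cols.foldl pvStepA (m, u) = ["forecast", "actual"].foldl (pvStepB cols) (m, u) := by
  induction cols with
  | nil =>
      intro m u
      simp only [List.foldl_nil, List.foldl_cons, pv_stepB_nil]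
  | cons c rest ih =>
      intro m u
      cases hu : PySem.Set.contains u c.1
      · cases harr : pvIsArrayNum c.2
        · -- not array-numeric: both sides skip the head column
          rw [List.foldl_cons, pv_stepA_notarr (m, u) c harr, ih m u,
            pv_rolesB_cons_skip c rest m u (by rw [harr, Bool.and_false])]
        · cases hf : m.contains "forecast"
          · -- forecast not yet assigned: the head column becomes "forecast"
            rw [List.foldl_cons, pv_stepA_forecast (m, u) c hu hf harr, ih]
            have hfind : pvFindEligible (c :: rest) u = some c.1 := pv_find_cons_hit c rest u hu harr
            simp only [List.foldl_cons, List.foldl_nil]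
            have hf2 : (m.insert "forecast" c.1).contains "forecast" = true :=
              PySem.Dict.contains_insert_self m "forecast" c.1
            have eL : pvStepB rest (m.insert "forecast" c.1, PySem.Set.add u c.1) "forecast"
                = (m.insert "forecast" c.1, PySem.Set.add u c.1) := pv_stepB_skip _ _ _ hf2
            have eR : pvStepB (c :: rest) (m, u) "forecast"
                = (m.insert "forecast" c.1, PySem.Set.add u c.1) := by
              rw [pv_stepB_go (c :: rest) (m, u) "forecast" hf, hfind]
            rw [eL, eR]
            cases ha : (m.insert "forecast" c.1).contains "actual"
            · rw [pv_stepB_go rest _ "actual" ha, pv_stepB_go (c :: rest) _ "actual" ha,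
                pv_find_cons_skip c rest (PySem.Set.add u c.1)
                  (by rw [pv_contains_add_self u c.1, Bool.not_true, Bool.false_and])]
            · rw [pv_stepB_skip rest _ "actual" ha, pv_stepB_skip (c :: rest) _ "actual" ha]
          · cases ha : m.contains "actual"
            · -- forecast assigned, actual not: the head column becomes "actual"
              rw [List.foldl_cons, pv_stepA_actual (m, u) c hu hf ha harr]
              have hf2 : (m.insert "actual" c.1).contains "forecast" = true := by
                rw [PySem.Dict.contains_insert]; simp only [hf, Bool.or_true]
              have ha2 : (m.insert "actual" c.1).contains "actual" = true :=
                PySem.Dict.contains_insert_self m "actual" c.1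
              rw [pv_skipAll rest _ _ hf2 ha2]
              simp only [List.foldl_cons, List.foldl_nil]
              rw [pv_stepB_skip (c :: rest) (m, u) "forecast" hf,
                pv_stepB_go (c :: rest) (m, u) "actual" ha,
                pv_find_cons_hit c rest u hu harr]
            · -- both roles already assigned: A skips everything, B skips both roles
              have hstep : pvStepA (m, u) c = (m, u) := by
                rw [pvStepA_eq]
                simp only [hf, ha, Bool.not_true, Bool.false_and, Bool.false_eq_true, if_false,
                  ite_self]
              rw [List.foldl_cons, hstep, pv_skipAll rest m u hf ha]
              simp only [List.foldl_cons, List.foldl_nil]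
              rw [pv_stepB_skip (c :: rest) (m, u) "forecast" hf,
                pv_stepB_skip (c :: rest) (m, u) "actual" ha]
      · -- head name already used: both sides ignore it
        rw [List.foldl_cons, pv_stepA_used (m, u) c hu, ih m u,
          pv_rolesB_cons_skip c rest m u (by rw [hu, Bool.not_true, Bool.false_and])]

-- ===== VERDICT (by name: the statement is the Claim_ definition above) =====
theorem detect_column_roles_spec : Claim_equal_detect_column_roles := by
  intro cols group_col _
  unfold Spec_detect_column_roles detect_column_roles detect_column_roles_alt
  exact congrArg (fun p => p.1.items) (pv_phase2_eq cols _ _)
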